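-- pv_equiv track=rewrite | github.com/vanHavel/AdventOfCode2023 | days/day12.py | backtrack
-- ===== SOURCE A (Python) =====
-- def backtrack(line, pos, ip) -> list[list[int]]:
--     if pos == len(line):
--         return [[ip]] if ip else [[]]
--     if line[pos] == "." and ip > 0:
--         return [[ip] + rec for rec in backtrack(line, pos+1, 0)]
--     if line[pos] == "." and ip == 0:
--         return backtrack(line, pos+1, 0)
--     if line[pos] == "#":
--         return backtrack(line, pos+1, ip+1)
--     if line[pos] == "?":
--         line[pos] = "."
--         a1 = backtrack(line, pos, ip)
--         line[pos] = "#"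
--         a2 = backtrack(line, pos, ip)
--         line[pos] = "?"
--         return a1 + a2
-- ===== SOURCE B (Python) =====
-- # Two-phase re-implementation: validate the natural domain, then enumerate every
-- # assignment for the '?' positions (earliest '?' most significant, '.' before '#',
-- # matching the recursive order), then run-length-scan each concrete filling with
-- # the run counter preset to ip.
-- def _filled(suffix, assign):
--     if not suffix:
--         return []
--     if suffix[0] == "?":
--         return assign[:1] + _filled(suffix[1:], assign[1:])
--     return [suffix[0]] + _filled(suffix[1:], assign)
--
-- def _groups(chars, ip):
--     groups = []
--     run = ip
--     for c in chars:
--         if c == "#":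
--             run += 1
--         elif run > 0:
--             groups.append(run)
--             run = 0
--     if run > 0:
--         groups.append(run)
--     return groups
--
-- def backtrack(line, pos, ip) -> list[list[int]]:
--     if not (0 <= pos <= len(line)):
--         raise IndexError("pos out of range")
--     if ip < 0:
--         raise ValueError("negative seed run length")
--     suffix = line[pos:]
--     if any(c not in (".", "#", "?") for c in suffix):
--         raise ValueError("unexpected spring character")
--     nq = suffix.count("?")
--     assigns = [[]]
--     for _ in range(nq):
--         assigns = [a + [c] for a in assigns for c in [".", "#"]]
--     return [_groups(_filled(suffix, a), ip) for a in assigns]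
-- ===== Notes on version B (the rewrite author's own statement) =====
-- stated objective: alternative
-- what changed: Replaces the mutate-and-recurse backtracking (which rewrites line[pos] in place and threads the running group length through the recursion) by two independent phases after validating the natural domain: first enumerate every '.'/'#' assignment for the '?' positions of line[pos:] by iterated list extension, then run-length-scan each concrete filling with the run counter preset to ip.
-- outside the precondition, e.g. on backtrack(['#'], -1, 0): A returns [[2]], B raises IndexError; on backtrack([], 0, -1): A returns [[-1]], B raises ValueError
import Mathlib
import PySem

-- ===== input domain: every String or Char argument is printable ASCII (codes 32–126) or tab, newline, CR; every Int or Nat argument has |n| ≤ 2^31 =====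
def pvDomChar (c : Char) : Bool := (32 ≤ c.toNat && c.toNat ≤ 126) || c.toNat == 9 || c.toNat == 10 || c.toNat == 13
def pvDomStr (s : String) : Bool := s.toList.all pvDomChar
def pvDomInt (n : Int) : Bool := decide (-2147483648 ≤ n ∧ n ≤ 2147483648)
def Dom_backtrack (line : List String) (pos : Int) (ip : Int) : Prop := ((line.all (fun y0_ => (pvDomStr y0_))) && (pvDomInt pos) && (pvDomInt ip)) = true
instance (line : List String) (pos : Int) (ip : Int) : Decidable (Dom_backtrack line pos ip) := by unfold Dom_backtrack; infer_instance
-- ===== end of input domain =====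

-- B replaces A's mutate-and-recurse backtracking by two phases — enumerate every
-- '?'-assignment of line[pos:], then run-length-scan each filling seeded with ip —
-- at the same exponential cost (objective: alternative). B validates the natural
-- domain up front and raises outside it (those inputs are outside Pre_). A mutates
-- `line` only temporarily and restores it before returning, so no side effect is
-- reproduced.

-- ===== PORT A =====

-- termination helpers for `backtrack`, cited by its decreasing_by
theorem dec_pos (line : List String) (pos : Int) (c : String)
    (h : PySem.List.pyGet? line pos = some c) :
    ((line.length : Int) - (pos + 1)).toNat < ((line.length : Int) - pos).toNat := by
  have hin : PySem.Raise.InRange line.length pos := by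
    by_contra hc
    have := (PySem.List.pyGet?_eq_none_iff line pos).mpr hc
    rw [this] at h
    simp at h
  obtain ⟨_, hlt⟩ := hin
  omega

-- an item assignment l[i] = v at an index that l[i] successfully read sets one resolved cell
theorem pySetD_resolve {α : Type} (l : List α) (i : Int) (c : α) (v : α)
    (h : PySem.List.pyGet? l i = some c) :
    ∃ n : Nat, ∃ hn : n < l.length, l[n] = c ∧ PySem.List.pySetD l i v = l.set n v := by
  unfold PySem.List.pyGet? at h
  cases hk : PySem.List.pyIdx? l.length i with
  | none => rw [hk] at h; simp at h
  | some k =>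
    rw [hk] at h
    simp only [Option.bind_some] at h
    have hkl : k < l.length := by
      by_contra hge
      rw [List.getElem?_eq_none (by omega)] at h
      simp at h
    refine ⟨k, hkl, ?_, ?_⟩
    · have := List.getElem?_eq_getElem hkl
      rw [this] at h
      exact (Option.some.injEq _ _).mp h
    · simp [PySem.List.pySetD, PySem.List.pySet?, hk]

theorem dec_q (line : List String) (pos : Int) (v : String) (hv : (v == "?") = false)
    (h : PySem.List.pyGet? line pos = some "?") :
    List.count "?" (PySem.List.pySetD line pos v) < List.count "?" line := by
  obtain ⟨n, hn, hget, hset⟩ := pySetD_resolve line pos "?" v h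
  rw [hset, List.count_set hn]
  have hpos : 0 < List.count "?" line := List.count_pos_iff.mpr (hget ▸ List.getElem_mem hn)
  rw [hget]
  simp [hv]
  exact List.count_pos_iff.mp hpos

def backtrack (line : List String) (pos : Int) (ip : Int) : List (List Int) :=
  if pos = (line.length : Int) then (if ip ≠ 0 then [[ip]] else [[]])
  else
    match h : PySem.List.pyGet? line pos with
    | none => []      -- Python: `line[pos]` raises IndexError here (outside Pre_)
    | some c =>
      if c = "." ∧ ip > 0 then
        (backtrack line (pos + 1) 0).map (fun r => ip :: r)
      else if c = "." ∧ ip = 0 then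
        backtrack line (pos + 1) 0
      else if c = "#" then
        backtrack line (pos + 1) (ip + 1)
      else if hq : c = "?" then
        backtrack (PySem.List.pySetD line pos ".") pos ip
          ++ backtrack (PySem.List.pySetD line pos "#") pos ip
      else []         -- Python falls off the function and returns None (outside Pre_)
termination_by (List.count "?" line, ((line.length : Int) - pos).toNat)
decreasing_by
  · exact Prod.Lex.right _ (dec_pos line pos c h)
  · exact Prod.Lex.right _ (dec_pos line pos c h)
  · exact Prod.Lex.right _ (dec_pos line pos c h)
  · exact Prod.Lex.left _ _ (dec_q line pos "." (by decide) (hq ▸ h))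
  · exact Prod.Lex.left _ _ (dec_q line pos "#" (by decide) (hq ▸ h))

-- ===== PORT B =====

-- port of Source B's _filled(suffix, assign): rebuild the suffix, consuming one
-- assignment entry (assign[:1] / assign[1:], as PySem slices) per '?'
def fillB (suffix : List String) (assign : List String) : List String :=
  match suffix with
  | [] => []
  | c :: t =>
      if c = "?" then
        PySem.List.slice assign none (some 1) ++ fillB t (PySem.List.slice assign (some 1) none)
      else c :: fillB t assign

-- port of Source B's _groups(chars, ip): one scan, run counter preset to ip
def groupsB (chars : List String) (ip : Int) : List Int :=
  let st := chars.foldl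
    (fun (st : List Int × Int) c =>
      if c = "#" then (st.1, st.2 + 1)
      else if st.2 > 0 then (st.1 ++ [st.2], 0)
      else st)
    ([], ip)
  if st.2 > 0 then st.1 ++ [st.2] else st.1

def backtrack_alt (line : List String) (pos : Int) (ip : Int) : List (List Int) :=
  if ¬ (0 ≤ pos ∧ pos ≤ (line.length : Int)) then []   -- Python: raise IndexError (outside Pre_)
  else if ip < 0 then []                               -- Python: raise ValueError (outside Pre_)
  else
  let suffix := PySem.List.slice line (some pos) none          -- line[pos:]
  if ∃ c ∈ suffix, ¬ (c = "." ∨ c = "#" ∨ c = "?") then []     -- any(c not in (".","#","?")): raise ValueError (outside Pre_)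
  else
  let nq : Nat := PySem.List.count suffix "?"
  let assigns := (PySem.List.pyRange 0 (nq : Int) 1).foldl     -- for _ in range(nq)
    (fun assigns _ => assigns.flatMap (fun a => [".", "#"].map (fun c => a ++ [c])))
    [[]]
  assigns.map (fun a => groupsB (fillB suffix a) ip)

-- ===== PRECONDITION & SPEC =====
-- Pre_ restricts to the function's natural call domain — 0 ≤ pos ≤ len(line), 0 ≤ ip,
-- every character from pos on is '.', '#' or '?'. Outside it A raises (IndexError, or
-- TypeError from None + None), returns None (not a list), or returns accidental values
-- of its implementation: negative-index wraparound for pos < 0, a spurious negative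
-- trailing group for ip < 0 (see the cites in claim.json).
def Pre_backtrack (line : List String) (pos : Int) (ip : Int) : Prop :=
  0 ≤ pos ∧ pos ≤ (line.length : Int) ∧ 0 ≤ ip ∧
    ∀ s ∈ line.drop pos.toNat, s = "." ∨ s = "#" ∨ s = "?"
instance (line : List String) (pos : Int) (ip : Int) : Decidable (Pre_backtrack line pos ip) := by unfold Pre_backtrack; infer_instance

def pvWitness_backtrack : List String × Int × Int := (["?", "#", ".", "?"], 1, 0)

def Spec_backtrack (line : List String) (pos : Int) (ip : Int) (out : List (List Int)) : Prop := out = backtrack_alt line pos ip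
instance (line : List String) (pos : Int) (ip : Int) (out : List (List Int)) : Decidable (Spec_backtrack line pos ip out) := by unfold Spec_backtrack; infer_instance

-- ===== CLAIM (what is proved, stated in full; the proofs are below) =====
def Claim_equal_backtrack : Prop := ∀ (line : List String) (pos : Int) (ip : Int), Dom_backtrack line pos ip → Pre_backtrack line pos ip → Spec_backtrack line pos ip (backtrack line pos ip)

-- ===== LEMMAS AND PROOFS =====

-- A's recursion rephrased on the suffix line[pos:] (the mutation becomes consing)
def btList (l : List String) (ip : Int) : List (List Int) :=
  match l with
  | [] => if ip ≠ 0 then [[ip]] else [[]]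
  | c :: t =>
    if c = "." ∧ ip > 0 then (btList t 0).map (fun r => ip :: r)
    else if c = "." ∧ ip = 0 then btList t 0
    else if c = "#" then btList t (ip + 1)
    else if c = "?" then btList ("." :: t) ip ++ btList ("#" :: t) ip
    else []
termination_by (List.count "?" l, l.length)
decreasing_by
  all_goals simp_all
  all_goals first
    | exact Prod.Lex.right _ (by omega)
    | exact Prod.Lex.left _ _ (by omega)

-- all concrete fillings of a pattern, '.' before '#', earliest '?' most significant
def fills (l : List String) : List (List String) :=
  match l with
  | [] => [[]]
  | c :: t =>
    if c = "?" then (fills t).map ("." :: ·) ++ (fills t).map ("#" :: ·)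
    else (fills t).map (c :: ·)

-- run lengths of the maximal '#'-runs, the first run seeded with `run`
def groupScan (l : List String) (run : Int) : List Int :=
  match l with
  | [] => if run > 0 then [run] else []
  | c :: t =>
    if c = "#" then groupScan t (run + 1)
    else if run > 0 then run :: groupScan t 0
    else groupScan t 0

-- one doubling step of B's assignment enumeration
def extendAll (as : List (List String)) : List (List String) :=
  as.flatMap (fun a => [".", "#"].map (fun c => a ++ [c]))

-- named forms of groupsB's fold (definitionally equal to its lambdas)
def gstep (st : List Int × Int) (c : String) : List Int × Int :=
  if c = "#" then (st.1, st.2 + 1)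
  else if st.2 > 0 then (st.1 ++ [st.2], 0)
  else st

def gfin (st : List Int × Int) : List Int :=
  if st.2 > 0 then st.1 ++ [st.2] else st.1

theorem backtrack_eq_btList (line : List String) (pos ip : Int) :
    0 ≤ pos → pos ≤ (line.length : Int) →
    backtrack line pos ip = btList (line.drop pos.toNat) ip := by
  induction line, pos, ip using backtrack.induct with
  | case1 a b hb =>
    intro _ _
    rw [backtrack]
    simp [hb, btList, List.drop_length]
  | case2 a b hb =>
    intro _ _
    rw [backtrack]
    simp [hb, btList, List.drop_length]
  | case3 a b i hne hnone =>
    intro h0 h1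
    have hlt : b < (a.length : Int) := lt_of_le_of_ne h1 hne
    rw [PySem.List.pyGet?_eq_some_getElem a h0 hlt] at hnone
    simp at hnone
  | case4 a b i hne c h hcond ih =>
    intro h0 h1
    have hlt : b < (a.length : Int) := lt_of_le_of_ne h1 hne
    have hn : b.toNat < a.length := by omega
    have h2 : (b + 1).toNat = b.toNat + 1 := by omega
    have hcc : a[b.toNat]'hn = c := by
      have h' := h
      rw [PySem.List.pyGet?_eq_some_getElem a h0 hlt] at h'
      exact Option.some_inj.mp h'
    have hdrop : a.drop b.toNat = c :: a.drop (b.toNat + 1) := by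
      rw [List.drop_eq_getElem_cons hn, hcc]
    rw [backtrack, if_neg hne]
    split
    · rename_i heq; rw [heq] at h; simp at h
    · rename_i c' heq
      rw [heq] at h
      have hc' : c' = c := Option.some_inj.mp h
      subst hc'
      rw [if_pos hcond, ih (by omega) (by omega), h2, hdrop]
      obtain ⟨hd, hip⟩ := hcond
      subst hd
      rw [btList]
      simp [hip]
  | case5 a b i hne c h hc1 hcond ih =>
    intro h0 h1
    have hlt : b < (a.length : Int) := lt_of_le_of_ne h1 hne
    have hn : b.toNat < a.length := by omega
    have h2 : (b + 1).toNat = b.toNat + 1 := by omega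
    have hcc : a[b.toNat]'hn = c := by
      have h' := h
      rw [PySem.List.pyGet?_eq_some_getElem a h0 hlt] at h'
      exact Option.some_inj.mp h'
    have hdrop : a.drop b.toNat = c :: a.drop (b.toNat + 1) := by
      rw [List.drop_eq_getElem_cons hn, hcc]
    rw [backtrack, if_neg hne]
    split
    · rename_i heq; rw [heq] at h; simp at h
    · rename_i c' heq
      rw [heq] at h
      have hc' : c' = c := Option.some_inj.mp h
      subst hc'
      rw [if_neg hc1, if_pos hcond, ih (by omega) (by omega), h2, hdrop]
      obtain ⟨hd, hip⟩ := hcond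
      subst hd
      rw [btList]
      simp [hip]
  | case6 a b i hne h hc1 hc2 ih =>
    intro h0 h1
    have hlt : b < (a.length : Int) := lt_of_le_of_ne h1 hne
    have hn : b.toNat < a.length := by omega
    have h2 : (b + 1).toNat = b.toNat + 1 := by omega
    have hcc : a[b.toNat]'hn = "#" := by
      have h' := h
      rw [PySem.List.pyGet?_eq_some_getElem a h0 hlt] at h'
      exact Option.some_inj.mp h'
    have hdrop : a.drop b.toNat = "#" :: a.drop (b.toNat + 1) := by
      rw [List.drop_eq_getElem_cons hn, hcc]
    rw [backtrack, if_neg hne]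
    split
    · rename_i heq; rw [heq] at h; simp at h
    · rename_i c' heq
      rw [heq] at h
      have hc' : c' = "#" := Option.some_inj.mp h
      subst hc'
      rw [if_neg hc1, if_neg hc2, if_pos rfl, ih (by omega) (by omega), h2, hdrop]
      rw [btList]
      simp
  | case7 a b i hne h hc1 hc2 hc3 ih1 ih2 =>
    intro h0 h1
    have hlt : b < (a.length : Int) := lt_of_le_of_ne h1 hne
    have hn : b.toNat < a.length := by omega
    have hcc : a[b.toNat]'hn = "?" := by
      have h' := h
      rw [PySem.List.pyGet?_eq_some_getElem a h0 hlt] at h'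
      exact Option.some_inj.mp h'
    have hd1 : (PySem.List.pySetD a b ".").drop b.toNat = "." :: a.drop (b.toNat + 1) := by
      rw [PySem.List.pySetD_of_nonneg a _ h0, List.drop_set,
          if_neg (by omega : ¬ b.toNat < b.toNat), Nat.sub_self,
          List.drop_eq_getElem_cons hn, List.set_cons_zero]
    have hd2 : (PySem.List.pySetD a b "#").drop b.toNat = "#" :: a.drop (b.toNat + 1) := by
      rw [PySem.List.pySetD_of_nonneg a _ h0, List.drop_set,
          if_neg (by omega : ¬ b.toNat < b.toNat), Nat.sub_self,
          List.drop_eq_getElem_cons hn, List.set_cons_zero]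
    have hdrop : a.drop b.toNat = "?" :: a.drop (b.toNat + 1) := by
      rw [List.drop_eq_getElem_cons hn, hcc]
    rw [backtrack, if_neg hne]
    split
    · rename_i heq; rw [heq] at h; simp at h
    · rename_i c' heq
      rw [heq] at h
      have hc' : c' = "?" := Option.some_inj.mp h
      subst hc'
      rw [if_neg hc1, if_neg hc2, if_neg hc3, dif_pos rfl]
      rw [ih1 h0 (by rw [PySem.List.length_pySetD]; exact h1),
          ih2 h0 (by rw [PySem.List.length_pySetD]; exact h1),
          hd1, hd2, hdrop]
      conv_rhs => rw [btList]
      simp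
  | case8 a b i hne c h hc1 hc2 hc3 hc4 =>
    intro h0 h1
    have hlt : b < (a.length : Int) := lt_of_le_of_ne h1 hne
    have hn : b.toNat < a.length := by omega
    have hcc : a[b.toNat]'hn = c := by
      have h' := h
      rw [PySem.List.pyGet?_eq_some_getElem a h0 hlt] at h'
      exact Option.some_inj.mp h'
    have hdrop : a.drop b.toNat = c :: a.drop (b.toNat + 1) := by
      rw [List.drop_eq_getElem_cons hn, hcc]
    rw [backtrack, if_neg hne]
    split
    · rename_i heq; rw [heq] at h; simp at h
    · rename_i c' heq
      rw [heq] at h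
      have hc' : c' = c := Option.some_inj.mp h
      subst hc'
      rw [if_neg hc1, if_neg hc2, if_neg hc3, dif_neg hc4, hdrop, btList]
      rw [if_neg hc1, if_neg hc2, if_neg hc3, if_neg hc4]

theorem groupScan_ne (c : String) (t : List String) (j : Int) (hc : c ≠ "#") :
    groupScan (c :: t) j = if 0 < j then j :: groupScan t 0 else groupScan t 0 := by
  rw [groupScan]; simp [hc]

theorem groupScan_hash (t : List String) (j : Int) :
    groupScan ("#" :: t) j = groupScan t (j + 1) := by
  rw [groupScan]; simp

theorem btList_dot (t : List String) (j : Int) (hj : 0 ≤ j) :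
    btList ("." :: t) j = if 0 < j then (btList t 0).map (fun r => j :: r) else btList t 0 := by
  rw [btList]
  by_cases hjp : 0 < j
  · simp [hjp]
  · have : j = 0 := by omega
    simp [this]

theorem btList_hash (t : List String) (j : Int) :
    btList ("#" :: t) j = btList t (j + 1) := by
  rw [btList]; simp

theorem btList_q (t : List String) (j : Int) :
    btList ("?" :: t) j = btList ("." :: t) j ++ btList ("#" :: t) j := by
  rw [btList]; simp

theorem btList_eq_map_groupScan (l : List String) :
    ∀ (ip : Int), 0 ≤ ip → (∀ s ∈ l, s = "." ∨ s = "#" ∨ s = "?") →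
    btList l ip = (fills l).map (fun f => groupScan f ip) := by
  induction l with
  | nil =>
    intro ip h0 _
    by_cases hip : ip = 0 <;> simp [btList, fills, groupScan, hip] <;> omega
  | cons c t ih =>
    intro ip h0 hv
    have hvt : ∀ s ∈ t, s = "." ∨ s = "#" ∨ s = "?" :=
      fun s hs => hv s (List.mem_cons_of_mem _ hs)
    have hdot : btList ("." :: t) ip = (fills t).map (fun f => groupScan ("." :: f) ip) := by
      rw [btList_dot t ip h0, ih 0 le_rfl hvt]
      by_cases hip : 0 < ip
      · simp only [if_pos hip, List.map_map]
        apply List.map_congr_left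
        intro f _
        simp [groupScan_ne "." f ip (by decide), hip]
      · simp only [if_neg hip]
        apply List.map_congr_left
        intro f _
        simp [groupScan_ne "." f ip (by decide), hip]
    have hhash : btList ("#" :: t) ip = (fills t).map (fun f => groupScan ("#" :: f) ip) := by
      rw [btList_hash, ih (ip + 1) (by omega) hvt]
      apply List.map_congr_left
      intro f _
      rw [groupScan_hash]
    rcases hv c List.mem_cons_self with hc | hc | hc <;> subst hc
    · rw [hdot, fills, if_neg (by decide), List.map_map]
      rfl
    · rw [hhash, fills, if_neg (by decide), List.map_map]
      rfl
    · rw [btList_q, hdot, hhash, fills, if_pos rfl, List.map_append, List.map_map, List.map_map]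
      rfl

theorem groupsB_eq_fold (chars : List String) (ip : Int) :
    groupsB chars ip = gfin (chars.foldl gstep ([], ip)) := rfl

theorem gfold_inv (chars : List String) :
    ∀ (acc : List Int) (run : Int), 0 ≤ run →
    gfin (chars.foldl gstep (acc, run)) = acc ++ groupScan chars run := by
  induction chars with
  | nil =>
    intro acc run _
    by_cases hr : 0 < run <;> simp [gfin, groupScan, hr]
  | cons c t ih =>
    intro acc run hrun
    rw [List.foldl_cons]
    by_cases hc : c = "#"
    · subst hc
      rw [show gstep (acc, run) "#" = (acc, run + 1) from by simp [gstep]]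
      rw [ih acc (run + 1) (by omega), groupScan_hash]
    · rw [groupScan_ne c t run hc]
      by_cases hr : 0 < run
      · rw [show gstep (acc, run) c = (acc ++ [run], 0) from by simp [gstep, hc, hr]]
        rw [ih (acc ++ [run]) 0 le_rfl]
        simp [hr]
      · have hr0 : run = 0 := by omega
        subst hr0
        rw [show gstep (acc, 0) c = (acc, 0) from by simp [gstep, hc]]
        rw [ih acc 0 le_rfl]
        simp [hr]

theorem groupsB_eq_groupScan (chars : List String) (ip : Int) (h0 : 0 ≤ ip) :
    groupsB chars ip = groupScan chars ip := by
  rw [groupsB_eq_fold]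
  exact (gfold_inv chars [] ip h0).trans (by simp)

theorem extendAll_append (X Y : List (List String)) :
    extendAll (X ++ Y) = extendAll X ++ extendAll Y := by
  simp [extendAll]

theorem extendAll_map_cons (c : String) (X : List (List String)) :
    extendAll (X.map (c :: ·)) = (extendAll X).map (c :: ·) := by
  simp [extendAll, List.flatMap_map, List.map_flatMap]

theorem iterate_extendAll_append (n : Nat) (X Y : List (List String)) :
    extendAll^[n] (X ++ Y) = extendAll^[n] X ++ extendAll^[n] Y := by
  induction n generalizing X Y with
  | zero => simp
  | succ n ih => simp [Function.iterate_succ_apply, extendAll_append, ih]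

theorem iterate_extendAll_map_cons (n : Nat) (c : String) (X : List (List String)) :
    extendAll^[n] (X.map (c :: ·)) = (extendAll^[n] X).map (c :: ·) := by
  induction n generalizing X with
  | zero => simp
  | succ n ih => simp [Function.iterate_succ_apply, extendAll_map_cons, ih]

theorem fillB_ne (c : String) (t : List String) (a : List String) (hc : c ≠ "?") :
    fillB (c :: t) a = c :: fillB t a := by
  rw [fillB]; simp [hc]

theorem fillB_q (t : List String) (x : String) (a : List String) :
    fillB ("?" :: t) (x :: a) = x :: fillB t a := by
  rw [fillB]
  rw [if_pos rfl, PySem.List.slice_to _ (by omega : (0:Int) ≤ 1),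
      PySem.List.slice_from _ (by omega : (0:Int) ≤ 1)]
  simp

theorem map_fillB_iterate (suffix : List String) :
    (extendAll^[List.count "?" suffix] [[]]).map (fillB suffix) = fills suffix := by
  induction suffix with
  | nil => simp [fills, fillB]
  | cons c t ih =>
    by_cases hc : c = "?"
    · subst hc
      have hcount : List.count "?" ("?" :: t) = List.count "?" t + 1 := by
        simp
      rw [hcount, Function.iterate_succ_apply]
      have h1 : extendAll [[]]
          = ([([] : List String)].map (("." : String) :: ·)) ++ ([([] : List String)].map (("#" : String) :: ·)) := by
        simp [extendAll]
      rw [h1, iterate_extendAll_append, iterate_extendAll_map_cons, iterate_extendAll_map_cons,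
          List.map_append, List.map_map, List.map_map]
      rw [fills, if_pos rfl]
      congr 1
      · rw [← ih, List.map_map]
        apply List.map_congr_left
        intro a _
        simp [Function.comp, fillB_q]
      · rw [← ih, List.map_map]
        apply List.map_congr_left
        intro a _
        simp [Function.comp, fillB_q]
    · have hcount : List.count "?" (c :: t) = List.count "?" t := by
        simp [List.count_cons, hc]
      rw [hcount, fills, if_neg hc, ← ih, List.map_map]
      apply List.map_congr_left
      intro a _
      simp [Function.comp, fillB_ne c t a hc]

theorem backtrack_alt_unfold (line : List String) (pos ip : Int) (h0 : 0 ≤ pos)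
    (h1 : pos ≤ (line.length : Int)) (hip : 0 ≤ ip)
    (hv : ∀ s ∈ line.drop pos.toNat, s = "." ∨ s = "#" ∨ s = "?") :
    backtrack_alt line pos ip
      = (extendAll^[List.count "?" (line.drop pos.toNat)] [[]]).map
          (fun a => groupsB (fillB (line.drop pos.toNat) a) ip) := by
  simp only [backtrack_alt]
  rw [if_neg (not_not_intro ⟨h0, h1⟩), if_neg (by omega)]
  rw [PySem.List.slice_from line h0]
  rw [if_neg (by rintro ⟨c, hc, hbad⟩; exact hbad (hv c hc))]
  rw [List.foldl_const, PySem.List.length_pyRange_one]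
  have hl : ((PySem.List.count (line.drop pos.toNat) "?" : Int) - 0).toNat
      = List.count "?" (line.drop pos.toNat) := by
    simp [PySem.List.count_eq]
  rw [hl]
  rfl

-- ===== VERDICT (by name: the statement is the Claim_ definition above) =====
theorem backtrack_spec : Claim_equal_backtrack := by
  intro line pos ip _hdom hpre
  obtain ⟨h0, h1, hip, hv⟩ := hpre
  unfold Spec_backtrack
  rw [backtrack_eq_btList line pos ip h0 h1,
      btList_eq_map_groupScan _ ip hip hv,
      backtrack_alt_unfold line pos ip h0 h1 hip hv,
      ← map_fillB_iterate (line.drop pos.toNat), List.map_map]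
  apply List.map_congr_left
  intro a _
  exact (groupsB_eq_groupScan _ ip hip).symm
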